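-- pv_equiv track=rewrite | github.com/Michael14567/Signal | 11hw.py | gf_to_alpha
-- ===== SOURCE A (Python) =====
-- PRIMITIVE_POLY = 0b10011
--
-- ALPHA = 0b0010
--
-- def gf_mul(a, b):
--     result = 0
--
--     while b:
--         if b & 1:
--             result ^= a
--
--         b >>= 1
--         a <<= 1
--
--         if a & 0b10000:
--             a ^= PRIMITIVE_POLY
--
--     return result & 0b1111
--
-- def gf_pow(a, power):
--     result = 1
--
--     for _ in range(power):
--         result = gf_mul(result, a)
--
--     return result
--
-- def alpha_power(power):
--     return gf_pow(ALPHA, power % 15)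
--
-- def gf_to_alpha(value):
--     if value == 0:
--         return "0"
--
--     for power in range(15):
--         if alpha_power(power) == value:
--             if power == 0:
--                 return "1"
--             if power == 1:
--                 return "alpha"
--             return f"alpha^{power}"
--
--     return str(value)
-- ===== SOURCE B (Python) =====
-- def gf_to_alpha(value):
--     if value == 0:
--         return "0"
--     table = {}
--     cur = 1
--     for power in range(15):
--         table[cur] = power
--         cur <<= 1
--         if cur & 0b10000:
--             cur ^= 0b10011
--     power = table.get(value)
--     if power is None:
--         return str(value)
--     if power == 0:
--         return "1"
--     if power == 1:
--         return "alpha"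
--     return f"alpha^{power}"
-- ===== Notes on version B (the rewrite author's own statement) =====
-- stated objective: simpler
-- what changed: B replaces A's per-power gf_pow scan (recomputing each alpha power from scratch via the bitwise gf_mul loop) by a single pass that builds a log table with a running product multiplied by alpha each step, then answers by one table lookup.
import Mathlib
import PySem

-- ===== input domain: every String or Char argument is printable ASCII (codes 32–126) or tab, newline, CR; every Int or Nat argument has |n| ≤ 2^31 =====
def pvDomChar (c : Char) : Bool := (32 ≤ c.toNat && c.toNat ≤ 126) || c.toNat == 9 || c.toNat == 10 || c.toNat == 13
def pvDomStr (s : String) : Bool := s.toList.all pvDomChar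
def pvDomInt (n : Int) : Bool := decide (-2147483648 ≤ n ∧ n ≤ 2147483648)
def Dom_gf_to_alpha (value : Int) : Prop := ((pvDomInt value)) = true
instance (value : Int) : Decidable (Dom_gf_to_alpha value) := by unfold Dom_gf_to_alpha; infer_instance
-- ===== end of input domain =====

-- B replaces A's per-power gf_pow scan by a single pass building a log table with a
-- running product (objective: simpler; 15 multiply-by-alpha steps instead of 15 gf_pow calls).

-- ===== PORT A =====
-- gf_mul's while-loop state (result, a, b); b is always a field element at every call
-- site in A, so it is ported as a Nat halved each round; the structural fuel b+1 is an
-- upper bound on the rounds (b strictly halves), it only makes the recursion structural.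
def gfMulLoop (fuel : Nat) (result a : Int) (b : Nat) : Int :=
  match fuel with
  | 0 => result
  | fuel + 1 =>
    if b = 0 then result
    else
      let result := if b % 2 = 1 then PySem.Int.bxor result a else result
      let b' := b / 2
      let a := a <<< 1
      let a := if PySem.Int.band a 16 ≠ 0 then PySem.Int.bxor a 19 else a
      gfMulLoop fuel result a b'

def gf_mul (a : Int) (b : Nat) : Int := PySem.Int.band (gfMulLoop (b + 1) 0 a b) 15

def gf_pow (a : Nat) (power : Int) : Int :=
  (List.range power.toNat).foldl (fun result _ => gf_mul result a) 1

def alpha_power (power : Int) : Int := gf_pow 2 (PySem.Int.mod power 15)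

def gfFindLoop (value : Int) : List Nat → String
  | [] => PySem.Int.toStr value
  | p :: rest =>
    if alpha_power (p : Int) = value then
      if p = 0 then "1"
      else if p = 1 then "alpha"
      else "alpha^" ++ PySem.Int.toStr (p : Int)
    else gfFindLoop value rest

def gf_to_alpha (value : Int) : String :=
  if value = 0 then "0"
  else gfFindLoop value (List.range 15)

-- ===== PORT B =====
-- one iteration of B's table-building loop: record table[cur] = power, then cur *= alpha
def altStep (st : Int × PySem.Dict Int Int) (power : Nat) : Int × PySem.Dict Int Int :=
  let table := st.2.insert st.1 (power : Int)
  let cur := st.1 <<< 1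
  let cur := if PySem.Int.band cur 16 ≠ 0 then PySem.Int.bxor cur 19 else cur
  (cur, table)

def altTable : Int × PySem.Dict Int Int := (List.range 15).foldl altStep (1, PySem.Dict.empty)

def gf_to_alpha_alt (value : Int) : String :=
  if value = 0 then "0"
  else
    match altTable.2.get? value with
    | none => PySem.Int.toStr value
    | some power =>
      if power = 0 then "1"
      else if power = 1 then "alpha"
      else "alpha^" ++ PySem.Int.toStr power

-- ===== PRECONDITION & SPEC =====
def Spec_gf_to_alpha (value : Int) (out : String) : Prop := out = gf_to_alpha_alt value
instance (value : Int) (out : String) : Decidable (Spec_gf_to_alpha value out) := by unfold Spec_gf_to_alpha; infer_instance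

-- ===== CLAIM (what is proved, stated in full; the proofs are below) =====
def Claim_equal_gf_to_alpha : Prop := ∀ (value : Int), Dom_gf_to_alpha value → Spec_gf_to_alpha value (gf_to_alpha value)

-- ===== LEMMAS AND PROOFS =====

-- ===== VERDICT (by name: the statement is the Claim_ definition above) =====
set_option maxHeartbeats 1000000 in
theorem gf_to_alpha_spec : Claim_equal_gf_to_alpha := by
  intro value _
  unfold Spec_gf_to_alpha
  by_cases h0 : value = 0
  · subst h0; decide
  by_cases h1 : value = 1
  · subst h1; decide
  by_cases h2 : value = 2
  · subst h2; decide
  by_cases h4 : value = 4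
  · subst h4; decide
  by_cases h8 : value = 8
  · subst h8; decide
  by_cases h3 : value = 3
  · subst h3; decide
  by_cases h6 : value = 6
  · subst h6; decide
  by_cases h12 : value = 12
  · subst h12; decide
  by_cases h11 : value = 11
  · subst h11; decide
  by_cases h5 : value = 5
  · subst h5; decide
  by_cases h10 : value = 10
  · subst h10; decide
  by_cases h7 : value = 7
  · subst h7; decide
  by_cases h14 : value = 14
  · subst h14; decide
  by_cases h15 : value = 15
  · subst h15; decide
  by_cases h13 : value = 13
  · subst h13; decide
  by_cases h9 : value = 9
  · subst h9; decide
  -- value is none of 0 and the 15 alpha powers: both sides return str(value)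
  have hr : List.range 15 = [0,1,2,3,4,5,6,7,8,9,10,11,12,13,14] := by decide
  have a0 : alpha_power (0 : Int) = 1 := by decide
  have a1 : alpha_power (1 : Int) = 2 := by decide
  have a2 : alpha_power (2 : Int) = 4 := by decide
  have a3 : alpha_power (3 : Int) = 8 := by decide
  have a4 : alpha_power (4 : Int) = 3 := by decide
  have a5 : alpha_power (5 : Int) = 6 := by decide
  have a6 : alpha_power (6 : Int) = 12 := by decide
  have a7 : alpha_power (7 : Int) = 11 := by decide
  have a8 : alpha_power (8 : Int) = 5 := by decide
  have a9 : alpha_power (9 : Int) = 10 := by decide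
  have a10 : alpha_power (10 : Int) = 7 := by decide
  have a11 : alpha_power (11 : Int) = 14 := by decide
  have a12 : alpha_power (12 : Int) = 15 := by decide
  have a13 : alpha_power (13 : Int) = 13 := by decide
  have a14 : alpha_power (14 : Int) = 9 := by decide
  have n0 : ¬ ((1:Int) = value) := fun h => h1 h.symm
  have n1 : ¬ ((2:Int) = value) := fun h => h2 h.symm
  have n2 : ¬ ((4:Int) = value) := fun h => h4 h.symm
  have n3 : ¬ ((8:Int) = value) := fun h => h8 h.symm
  have n4 : ¬ ((3:Int) = value) := fun h => h3 h.symm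
  have n5 : ¬ ((6:Int) = value) := fun h => h6 h.symm
  have n6 : ¬ ((12:Int) = value) := fun h => h12 h.symm
  have n7 : ¬ ((11:Int) = value) := fun h => h11 h.symm
  have n8 : ¬ ((5:Int) = value) := fun h => h5 h.symm
  have n9 : ¬ ((10:Int) = value) := fun h => h10 h.symm
  have n10 : ¬ ((7:Int) = value) := fun h => h7 h.symm
  have n11 : ¬ ((14:Int) = value) := fun h => h14 h.symm
  have n12 : ¬ ((15:Int) = value) := fun h => h15 h.symm
  have n13 : ¬ ((13:Int) = value) := fun h => h13 h.symm
  have n14 : ¬ ((9:Int) = value) := fun h => h9 h.symm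
  have hfold : altTable = (1, PySem.Dict.mk [((1:Int),(0:Int)), ((2:Int),(1:Int)), ((4:Int),(2:Int)), ((8:Int),(3:Int)), ((3:Int),(4:Int)), ((6:Int),(5:Int)), ((12:Int),(6:Int)), ((11:Int),(7:Int)), ((5:Int),(8:Int)), ((10:Int),(9:Int)), ((7:Int),(10:Int)), ((14:Int),(11:Int)), ((15:Int),(12:Int)), ((13:Int),(13:Int)), ((9:Int),(14:Int))]) := by decide
  have hA : gf_to_alpha value = PySem.Int.toStr value := by
    simp only [gf_to_alpha, if_neg h0, hr, gfFindLoop, Nat.cast_ofNat, Nat.cast_one,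
      Nat.cast_zero, a0, a1, a2, a3, a4, a5, a6, a7, a8, a9, a10, a11, a12, a13, a14]
    rw [if_neg n0, if_neg n1, if_neg n2, if_neg n3, if_neg n4, if_neg n5, if_neg n6, if_neg n7, if_neg n8, if_neg n9, if_neg n10, if_neg n11, if_neg n12, if_neg n13, if_neg n14]
  have hB : gf_to_alpha_alt value = PySem.Int.toStr value := by
    simp only [gf_to_alpha_alt, if_neg h0, hfold, PySem.Dict.get?_mk_cons, beq_iff_eq]
    rw [if_neg n0, if_neg n1, if_neg n2, if_neg n3, if_neg n4, if_neg n5, if_neg n6, if_neg n7, if_neg n8, if_neg n9, if_neg n10, if_neg n11, if_neg n12, if_neg n13, if_neg n14]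
    rfl
  rw [hA, hB]
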